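-- pv_equiv track=rewrite | github.com/g0yujin/CodingTest_Practice | 프로그래머스/1/389478. 택배 상자 꺼내기/택배 상자 꺼내기.py | solution
-- ===== SOURCE A (Python) =====
-- def solution(n, w, num):
--
--
--     h = 0    # 층 수
--     result = 0
--
--     if n % w == 0:
--         h = n//w
--
--     else:
--         h = n // w + 1
--
--     arr = [[0 for _ in range(w)] for _ in range(h)]
--
--     # 택배 놓기
--     box = 1
--     num_i = 0
--     num_j = 0
--
--     for i in range(h):
--         if box == n+1:
--             break
--         # 짝수행
--         if i % 2 == 0:
--             for j in range(w):
--                 if box == num: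
--                     num_i = i
--                     num_j = j
--
--                 if box <= n:
--                     arr[i][j] = box
--                     box += 1
--
--         # 홀수행
--         else:
--             for j in range(w-1, -1, -1):
--                 if box == num:
--                     num_i = i
--                     num_j = j
--
--                 if box <= n:
--                     arr[i][j] = box
--                     box += 1
--
--
--     for i in range(num_i, h):
--         if arr[i][num_j] != 0:
--             result += 1
--
--     return result
-- ===== SOURCE B (Python) =====
-- def solution(n, w, num):
--     # Closed-form arithmetic: locate num's row/column by parity, then count the
--     # filled cells in that column above it (all rows below the top are full).
--     h = -(-n // w)                       # ceil(n / w)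
--     if h <= 0:                           # empty pile: nothing stacked
--         return 0
--     r, c = divmod(num - 1, w)            # row of num and its offset within the row
--     if r % 2 == 1:                       # odd rows run right-to-left
--         c = w - 1 - c
--     top = h - 1
--     top_val = top * w + (c if top % 2 == 0 else w - 1 - c) + 1
--     return (top - r) + (1 if top_val <= n else 0)
-- ===== Notes on version B (the rewrite author's own statement) =====
-- stated objective: faster
-- what changed: B replaces A's construction of the whole h-by-w snake grid and its two scans by O(1) arithmetic: num's row/column from divmod and row parity, and the count of occupied cells above it as (h-1-r) plus a test of the top cell of that column (empty pile, h <= 0, gives 0).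
-- intended difference: For num outside [1,n] (with w>=1, n>=1) A returns a count read from the leftover default position num_i=num_j=0 (or the first empty slot when num=n+1) because the box is never found in the grid; B returns the value of its formula for the place where box num would sit — for a box that is not in the pile neither value is specified and B's is the consistent extrapolation. — e.g. on solution(5, 2, 7): A returns 3, B returns -1
import Mathlib
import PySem

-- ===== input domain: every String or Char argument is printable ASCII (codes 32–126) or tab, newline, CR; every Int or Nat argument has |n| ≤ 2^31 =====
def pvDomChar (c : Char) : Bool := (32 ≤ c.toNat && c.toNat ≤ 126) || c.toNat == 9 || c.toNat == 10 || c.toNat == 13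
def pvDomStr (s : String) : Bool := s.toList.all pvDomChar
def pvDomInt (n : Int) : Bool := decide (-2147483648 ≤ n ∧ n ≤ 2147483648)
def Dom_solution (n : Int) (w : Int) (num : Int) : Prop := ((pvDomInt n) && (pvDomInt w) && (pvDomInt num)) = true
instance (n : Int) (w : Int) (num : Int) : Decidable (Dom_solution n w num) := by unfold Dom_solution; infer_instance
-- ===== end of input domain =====

-- B replaces A's construction of the whole snake grid and its two scans by O(1)
-- arithmetic: num's row/column from divmod and row parity, and the count above it
-- as (h-1-r) plus a test of the top cell of that column.

-- ===== PORT A =====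
-- body of A's inner `for j in ...` loops (identical in both parity branches; only the
-- range differs).  arr[i][j] = box is ported as pySetD/pyGetD; on Pre_ the indices are
-- always in range, exactly as Python's accesses are.
def aInnerStep (n : Int) (num : Int) (i : Int)
    (t : List (List Int) × Int × Int × Int) (j : Int) : List (List Int) × Int × Int × Int :=
  let arr := t.1
  let box := t.2.1
  let p := if box = num then (i, j) else (t.2.2.1, t.2.2.2)
  if box ≤ n then
    (PySem.List.pySetD arr i (PySem.List.pySetD (PySem.List.pyGetD arr i []) j box),
     box + 1, p.1, p.2)
  else (arr, box, p.1, p.2)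

-- body of A's outer `for i in range(h)`; the Bool component records Python's `break`.
def aOuterStep (n : Int) (w : Int) (num : Int)
    (s : List (List Int) × Int × Int × Int × Bool) (i : Int) :
    List (List Int) × Int × Int × Int × Bool :=
  if s.2.2.2.2 then s
  else if s.2.1 = n + 1 then (s.1, s.2.1, s.2.2.1, s.2.2.2.1, true)
  else if PySem.Int.mod i 2 = 0 then
    let t := (PySem.List.pyRange 0 w 1).foldl (aInnerStep n num i) (s.1, s.2.1, s.2.2.1, s.2.2.2.1)
    (t.1, t.2.1, t.2.2.1, t.2.2.2, false)
  else
    let t := (PySem.List.pyRange (w - 1) (-1) (-1)).foldl (aInnerStep n num i) (s.1, s.2.1, s.2.2.1, s.2.2.2.1)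
    (t.1, t.2.1, t.2.2.1, t.2.2.2, false)

def solution (n : Int) (w : Int) (num : Int) : Int :=
  let h := if PySem.Int.mod n w = 0 then PySem.Int.floordiv n w else PySem.Int.floordiv n w + 1
  let arr : List (List Int) :=
    (PySem.List.pyRange 0 h 1).map (fun _ => (PySem.List.pyRange 0 w 1).map (fun _ => (0 : Int)))
  let s := (PySem.List.pyRange 0 h 1).foldl (aOuterStep n w num) (arr, 1, 0, 0, false)
  (PySem.List.pyRange s.2.2.1 h 1).foldl
    (fun result i =>
      if PySem.List.pyGetD (PySem.List.pyGetD s.1 i []) s.2.2.2.1 0 ≠ 0 then result + 1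
      else result) 0

-- ===== PORT B =====
def solution_alt (n : Int) (w : Int) (num : Int) : Int :=
  let h := -(PySem.Int.floordiv (-n) w)
  if h ≤ 0 then 0
  else
  let r := PySem.Int.floordiv (num - 1) w
  let c0 := PySem.Int.mod (num - 1) w
  let c := if PySem.Int.mod r 2 = 1 then w - 1 - c0 else c0
  let top := h - 1
  let topVal := top * w + (if PySem.Int.mod top 2 = 0 then c else w - 1 - c) + 1
  (top - r) + (if topVal ≤ n then 1 else 0)

-- ===== PRECONDITION & SPEC =====
-- Pre_ is exactly the inputs on which Python A returns normally: w = 0 raises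
-- ZeroDivisionError, and w < 0 with n < 0 raises IndexError (the computed height is
-- positive but the rows are empty).
def Pre_solution (n : Int) (w : Int) (num : Int) : Prop := 1 ≤ w ∨ (w ≤ -1 ∧ 0 ≤ n)
instance (n : Int) (w : Int) (num : Int) : Decidable (Pre_solution n w num) := by
  unfold Pre_solution; infer_instance

def pvWitness_solution : Int × Int × Int := (5, 2, 1)

-- For num outside [1,n] (with w>=1, n>=1) A returns a count read from the leftover
-- default position num_i=num_j=0 (or the first empty slot when num=n+1), because the
-- box is never found; B returns its formula's value for the place where box num would
-- sit — neither value is specified for a box that is not in the pile.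
def D_solution (n : Int) (w : Int) (num : Int) : Prop := 1 ≤ w ∧ 1 ≤ n ∧ (num < 1 ∨ n < num)
instance (n : Int) (w : Int) (num : Int) : Decidable (D_solution n w num) := by
  unfold D_solution; infer_instance

def Spec_solution (n : Int) (w : Int) (num : Int) (out : Int) : Prop := ¬ D_solution n w num → out = solution_alt n w num
instance (n : Int) (w : Int) (num : Int) (out : Int) : Decidable (Spec_solution n w num out) := by
  unfold Spec_solution; infer_instance

def pvDiffWitness_solution : Int × Int × Int := (5, 2, 7)
def pvDiffWitnessOut_solution : Int × Int := (3, -1)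

-- ===== CLAIM (what is proved, stated in full; the proofs are below) =====
def Claim_unchanged_solution : Prop := ∀ (n : Int) (w : Int) (num : Int), Dom_solution n w num → Pre_solution n w num → Spec_solution n w num (solution n w num)
def Claim_changed_solution : Prop := Dom_solution (pvDiffWitness_solution.1) (pvDiffWitness_solution.2.1) (pvDiffWitness_solution.2.2) ∧ Pre_solution (pvDiffWitness_solution.1) (pvDiffWitness_solution.2.1) (pvDiffWitness_solution.2.2) ∧ D_solution (pvDiffWitness_solution.1) (pvDiffWitness_solution.2.1) (pvDiffWitness_solution.2.2) ∧ solution (pvDiffWitness_solution.1) (pvDiffWitness_solution.2.1) (pvDiffWitness_solution.2.2) = pvDiffWitnessOut_solution.1 ∧ solution_alt (pvDiffWitness_solution.1) (pvDiffWitness_solution.2.1) (pvDiffWitness_solution.2.2) = pvDiffWitnessOut_solution.2 ∧ pvDiffWitnessOut_solution.1 ≠ pvDiffWitnessOut_solution.2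

-- ===== LEMMAS AND PROOFS =====

-- value the snake grid holds at row i, column j (before the "fits below n" cut-off)
def cellVal (w : Int) (i : Int) (j : Int) : Int :=
  i * w + (if PySem.Int.mod i 2 = 0 then j else w - 1 - j) + 1

theorem getD_set_eq {α : Type} (xs : List α) (i : Nat) (v d : α) (j : Nat) :
    (xs.set i v).getD j d = if i = j ∧ j < xs.length then v else xs.getD j d := by
  simp [List.getD_eq_getElem?_getD, List.getElem?_set]
  split_ifs with h1 h2 h3 <;> simp_all

-- reading one cell of the grid written through the port's pySetD/pyGetD pair
theorem pyGetD2_pySetD (arr : List (List Int)) (k j v i' j' : Int)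
    (hk0 : 0 ≤ k) (hk : k < (arr.length : Int))
    (hj0 : 0 ≤ j) (hj : ∀ row ∈ arr, j < (row.length : Int))
    (hi'0 : 0 ≤ i') (hi' : i' < (arr.length : Int)) (hj'0 : 0 ≤ j') :
    PySem.List.pyGetD (PySem.List.pyGetD
        (PySem.List.pySetD arr k (PySem.List.pySetD (PySem.List.pyGetD arr k []) j v)) i' []) j' 0 =
      if i' = k ∧ j' = j then v
      else PySem.List.pyGetD (PySem.List.pyGetD arr i' []) j' 0 := by
  have hklen : k.toNat < arr.length := by omega
  have hi'len : i'.toNat < arr.length := by omega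
  have hrowk : arr.getD k.toNat [] = arr[k.toNat] := by
    simp [List.getD_eq_getElem?_getD, List.getElem?_eq_getElem hklen]
  have hjk : j.toNat < arr[k.toNat].length := by
    have := hj _ (List.getElem_mem hklen); omega
  rw [PySem.List.pySetD_of_nonneg _ _ hj0, PySem.List.pySetD_of_nonneg _ _ hk0,
      PySem.List.pyGetD_of_nonneg _ _ hk0, PySem.List.pyGetD_of_nonneg _ _ hi'0,
      PySem.List.pyGetD_of_nonneg _ _ hi'0, PySem.List.pyGetD_of_nonneg _ _ hj'0,
      PySem.List.pyGetD_of_nonneg _ _ hj'0, hrowk, getD_set_eq]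
  by_cases hik : i'.toNat = k.toNat
  · simp only [hik, hklen, and_self, if_true, getD_set_eq, hrowk]
    have : i' = k := by omega
    simp only [this, true_and]
    split_ifs with h1 h2 h3 <;> first | rfl | omega
  · have hne : ¬ (k.toNat = i'.toNat ∧ i'.toNat < arr.length) := fun h => hik h.1.symm
    have : ¬ (i' = k) := by omega
    simp [this, hne]

-- invariant of one inner row loop, phrased for both traversal directions at once:
-- step t visits column pos t and would place box b0 + t there; val says which box
-- number each column receives.
theorem inner_invariant (n num w k b0 : Int) (val : Int → Int) (pos : Nat → Int)
    (arr0 : List (List Int)) (p0 : Int × Int) (m : Nat)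
    (hnum : num ≤ n) (hb0 : b0 ≤ n + 1)
    (hk0 : 0 ≤ k) (hk : k < (arr0.length : Int))
    (hrows : ∀ row ∈ arr0, (row.length : Int) = w)
    (hpos : ∀ t : Nat, t < m → 0 ≤ pos t ∧ pos t < w)
    (hval : ∀ t : Nat, t < m → val (pos t) = b0 + t) :
    ∃ arr1 : List (List Int),
      ((List.range m).map pos).foldl (aInnerStep n num k) (arr0, b0, p0.1, p0.2) =
        (arr1, min (b0 + m) (n + 1),
         (if b0 ≤ num ∧ num < b0 + m then ((k, pos (num - b0).toNat) : Int × Int) else p0).1,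
         (if b0 ≤ num ∧ num < b0 + m then ((k, pos (num - b0).toNat) : Int × Int) else p0).2) ∧
      arr1.length = arr0.length ∧
      (∀ row ∈ arr1, (row.length : Int) = w) ∧
      (∀ i j : Int, 0 ≤ i → i < (arr0.length : Int) → 0 ≤ j → j < w →
        PySem.List.pyGetD (PySem.List.pyGetD arr1 i []) j 0 =
          if i = k ∧ (∃ t : Nat, t < m ∧ pos t = j) ∧ val j ≤ n then val j
          else PySem.List.pyGetD (PySem.List.pyGetD arr0 i []) j 0) := by
  induction m with
  | zero =>
    refine ⟨arr0, ?_, rfl, hrows, ?_⟩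
    · simp only [List.range_zero, List.map_nil, List.foldl_nil, Nat.cast_zero, add_zero]
      rw [min_eq_left hb0, if_neg (by omega)]
    · intro i j _ _ _ _
      rw [if_neg]
      rintro ⟨_, ⟨t, ht, _⟩, _⟩; omega
  | succ m ih =>
    obtain ⟨arr1, hfold, hlen, hrows1, hcontent⟩ :=
      ih (fun t ht => hpos t (by omega)) (fun t ht => hval t (by omega))
    rw [List.range_succ, List.map_append, List.foldl_append, hfold]
    simp only [List.map_cons, List.map_nil, List.foldl_cons, List.foldl_nil]
    by_cases hle : b0 + (m : Int) ≤ n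
    · have hboxm : min (b0 + (m : Int)) (n + 1) = b0 + m := min_eq_left (by omega)
      refine ⟨PySem.List.pySetD arr1 k
          (PySem.List.pySetD (PySem.List.pyGetD arr1 k []) (pos m) (b0 + m)), ?_, ?_, ?_, ?_⟩
      · simp only [aInnerStep, hboxm, if_pos hle]
        have hmin : min (b0 + ((m + 1 : Nat) : Int)) (n + 1) = b0 + (m : Int) + 1 := by
          push_cast; omega
        rw [hmin]
        by_cases hne : b0 + (m : Int) = num
        · rw [if_pos hne, if_pos (show b0 ≤ num ∧ num < b0 + ((m + 1 : Nat) : Int) by push_cast; omega)]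
          have hm : (num - b0).toNat = m := by omega
          rw [hm]
        · rw [if_neg hne]
          have h2 : (b0 ≤ num ∧ num < b0 + ((m + 1 : Nat) : Int)) ↔ (b0 ≤ num ∧ num < b0 + (m : Int)) := by
            push_cast; omega
          simp only [h2]
      · rw [PySem.List.pySetD_of_nonneg _ _ hk0, List.length_set, hlen]
      · intro row hrow
        rw [PySem.List.pySetD_of_nonneg _ _ hk0] at hrow
        rcases List.mem_or_eq_of_mem_set hrow with h | h
        · exact hrows1 row h
        · subst h
          rw [PySem.List.pySetD_of_nonneg _ _ (hpos m (by omega)).1, List.length_set]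
          have hklen : k.toNat < arr1.length := by omega
          have : arr1.getD k.toNat [] = arr1[k.toNat] := by
            simp [List.getD_eq_getElem?_getD, List.getElem?_eq_getElem hklen]
          rw [PySem.List.pyGetD_of_nonneg _ _ hk0, this]
          exact hrows1 _ (List.getElem_mem hklen)
      · intro i j hi0 hi hj0 hj
        rw [pyGetD2_pySetD arr1 k (pos m) (b0 + m) i j hk0 (by omega) (hpos m (by omega)).1
            (fun row hrow => by rw [hrows1 row hrow]; exact (hpos m (by omega)).2)
            hi0 (by omega) hj0]
        by_cases hij : i = k ∧ j = pos m
        · rw [if_pos hij, if_pos]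
          · rw [hij.2, hval m (by omega)]
          · exact ⟨hij.1, ⟨m, by omega, hij.2.symm⟩, by rw [hij.2, hval m (by omega)]; omega⟩
        · rw [if_neg hij, hcontent i j hi0 hi hj0 hj]
          have hiff : (i = k ∧ (∃ t : Nat, t < m + 1 ∧ pos t = j) ∧ val j ≤ n) ↔
              (i = k ∧ (∃ t : Nat, t < m ∧ pos t = j) ∧ val j ≤ n) := by
            constructor
            · rintro ⟨hik, ⟨t, ht, hpt⟩, hv⟩
              refine ⟨hik, ⟨t, ?_, hpt⟩, hv⟩
              rcases Nat.lt_succ_iff_lt_or_eq.mp ht with h | h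
              · exact h
              · exfalso; exact hij ⟨hik, by rw [← hpt, h]⟩
            · rintro ⟨hik, ⟨t, ht, hpt⟩, hv⟩
              exact ⟨hik, ⟨t, by omega, hpt⟩, hv⟩
          rw [if_congr hiff rfl rfl]
    · have hboxm : min (b0 + (m : Int)) (n + 1) = n + 1 := min_eq_right (by omega)
      refine ⟨arr1, ?_, hlen, hrows1, ?_⟩
      · simp only [aInnerStep, hboxm, if_neg (show ¬ ((n:Int) + 1 = num) by omega),
          if_neg (show ¬ ((n:Int) + 1 ≤ n) by omega)]
        have h1 : min (b0 + ((m + 1 : Nat) : Int)) (n + 1) = n + 1 := by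
          push_cast; omega
        have h2 : (b0 ≤ num ∧ num < b0 + ((m + 1 : Nat) : Int)) ↔ (b0 ≤ num ∧ num < b0 + (m : Int)) := by
          push_cast; omega
        rw [h1]
        simp only [h2]
      · intro i j hi0 hi hj0 hj
        rw [hcontent i j hi0 hi hj0 hj]
        have hiff : (i = k ∧ (∃ t : Nat, t < m + 1 ∧ pos t = j) ∧ val j ≤ n) ↔
            (i = k ∧ (∃ t : Nat, t < m ∧ pos t = j) ∧ val j ≤ n) := by
          constructor
          · rintro ⟨hik, ⟨t, ht, hpt⟩, hv⟩
            refine ⟨hik, ⟨t, ?_, hpt⟩, hv⟩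
            rcases Nat.lt_succ_iff_lt_or_eq.mp ht with h | h
            · exact h
            · exfalso
              rw [← hpt, h, hval m (by omega)] at hv
              omega
          · rintro ⟨hik, ⟨t, ht, hpt⟩, hv⟩
            exact ⟨hik, ⟨t, by omega, hpt⟩, hv⟩
        rw [if_congr hiff rfl rfl]

-- invariant of the outer row loop: after K rows the box counter, the recorded
-- position of num and every cell of the grid are determined in closed form.
theorem outer_invariant (n w num r c hA : Int)
    (hw : 1 ≤ w) (hnum1 : 1 ≤ num) (hnumn : num ≤ n)
    (hr0 : 0 ≤ r) (hrw : r * w < num ∧ num ≤ (r + 1) * w)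
    (hc : 0 ≤ c ∧ c < w) (hcval : cellVal w r c = num)
    (arr0 : List (List Int))
    (hz0 : ∀ i j : Int, 0 ≤ i → 0 ≤ j → PySem.List.pyGetD (PySem.List.pyGetD arr0 i []) j 0 = 0)
    (hrows0 : ∀ row ∈ arr0, (row.length : Int) = w)
    (hAlen : (arr0.length : Int) = hA) (hh2 : n ≤ hA * w)
    (K : Nat) (hK : (K : Int) ≤ hA) :
    ∃ arr1 : List (List Int),
      ((List.range K).map (fun t => ((t : Nat) : Int))).foldl (aOuterStep n w num)
          (arr0, 1, 0, 0, false) =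
        (arr1, min ((K : Int) * w + 1) (n + 1),
         (if num ≤ (K : Int) * w then ((r, c) : Int × Int) else ((0, 0) : Int × Int)).1,
         (if num ≤ (K : Int) * w then ((r, c) : Int × Int) else ((0, 0) : Int × Int)).2,
         (if 0 < (K : Int) ∧ n ≤ ((K : Int) - 1) * w then true else false)) ∧
      arr1.length = arr0.length ∧
      (∀ row ∈ arr1, (row.length : Int) = w) ∧
      (∀ i j : Int, 0 ≤ i → i < (arr0.length : Int) → 0 ≤ j → j < w →
        PySem.List.pyGetD (PySem.List.pyGetD arr1 i []) j 0 =
          if i < (K : Int) ∧ cellVal w i j ≤ n then cellVal w i j else 0) := by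
  induction K with
  | zero =>
    refine ⟨arr0, ?_, rfl, hrows0, ?_⟩
    · simp only [List.range_zero, List.map_nil, List.foldl_nil, Nat.cast_zero]
      rw [if_neg (by omega), if_neg (by omega)]
      have : min ((0 : Int) * w + 1) (n + 1) = 1 := by omega
      rw [this]
    · intro i j hi0 hi hj0 hj
      rw [hz0 i j hi0 hj0, if_neg (by push_cast; omega)]
  | succ K ih =>
    obtain ⟨arr1, hfold, hlen, hrows1, hcontent⟩ := ih (by push_cast; push_cast at hK; omega)
    rw [List.range_succ, List.map_append, List.foldl_append, hfold]
    simp only [List.map_cons, List.map_nil, List.foldl_cons, List.foldl_nil]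
    have hKK : ((K : Int) - 1) * w ≤ (K : Int) * w := by
      apply mul_le_mul_of_nonneg_right (by omega) (by omega)
    have hKK1 : (K : Int) * w ≤ ((K : Int) + 1) * w := by
      apply mul_le_mul_of_nonneg_right (by omega) (by omega)
    have e0 : ((K + 1 : Nat) : Int) = (K : Int) + 1 := by push_cast; ring
    rw [e0, show ((K : Int) + 1) * w = (K : Int) * w + w by ring,
        show ((K : Int) + 1 - 1) * w = (K : Int) * w by ring]
    have hstep_iff : ∀ i j : Int, 0 ≤ j → j < w → n ≤ (K : Int) * w →
        ((i < (K : Int) + 1 ∧ cellVal w i j ≤ n) ↔ (i < (K : Int) ∧ cellVal w i j ≤ n)) := by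
      intro i j hj0 hj hn
      constructor
      · rintro ⟨h1, h2⟩
        refine ⟨?_, h2⟩
        by_contra hcon
        have hi : i = (K : Int) := by omega
        rw [hi] at h2
        unfold cellVal at h2
        rcases PySem.Int.mod_two_eq (K : Int) with hp | hp
        · rw [if_pos hp] at h2; omega
        · rw [if_neg (by omega)] at h2; omega
      · rintro ⟨h1, h2⟩; exact ⟨by omega, h2⟩
    by_cases hbk : 0 < (K : Int) ∧ n ≤ ((K : Int) - 1) * w
    · -- already broken: the step is the identity
      rw [if_pos hbk]
      refine ⟨arr1, ?_, hlen, hrows1, ?_⟩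
      · simp only [aOuterStep, if_true]
        rw [show min ((K : Int) * w + 1) (n + 1) = n + 1 by omega,
            show min ((K : Int) * w + w + 1) (n + 1) = n + 1 by omega,
            if_pos (by omega), if_pos (by omega), if_pos (by omega)]
      · intro i j hi0 hi hj0 hj
        rw [hcontent i j hi0 hi hj0 hj, if_congr (hstep_iff i j hj0 hj (by omega)) rfl rfl]
    · rw [if_neg hbk]
      by_cases hfull : n ≤ (K : Int) * w
      · -- the break fires at this row
        refine ⟨arr1, ?_, hlen, hrows1, ?_⟩
        · simp only [aOuterStep, Bool.false_eq_true, if_false]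
          rw [show min ((K : Int) * w + 1) (n + 1) = n + 1 by omega, if_pos rfl,
              show min ((K : Int) * w + w + 1) (n + 1) = n + 1 by omega,
              if_pos (by omega), if_pos (by omega), if_pos (by omega)]
        · intro i j hi0 hi hj0 hj
          rw [hcontent i j hi0 hi hj0 hj, if_congr (hstep_iff i j hj0 hj hfull) rfl rfl]
      · -- active row
        have hKlt : (K : Int) < hA := by
          have := lt_of_mul_lt_mul_right (show (K : Int) * w < hA * w by omega) (by omega : (0:Int) ≤ w)
          exact this
        have hbox : min ((K : Int) * w + 1) (n + 1) = (K : Int) * w + 1 := by omega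
        have hWw : ((w.toNat : Nat) : Int) = w := Int.toNat_of_nonneg (by omega)
        have hr_eq_of_mid : ¬ num ≤ (K : Int) * w → num ≤ (K : Int) * w + w → r = (K : Int) := by
          intro h1 h2
          have hKr : r ≤ (K : Int) := by
            by_contra hcon
            have h3 : ((K : Int) + 1) * w ≤ r * w :=
              mul_le_mul_of_nonneg_right (by omega) (by omega)
            rw [show ((K : Int) + 1) * w = (K : Int) * w + w by ring] at h3
            omega
          have hrK : (K : Int) ≤ r := by
            by_contra hcon
            have : (r + 1) * w ≤ (K : Int) * w :=
              mul_le_mul_of_nonneg_right (by omega) (by omega)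
            omega
          omega
        have hreq : ¬ num ≤ (K : Int) * w → num ≤ (K : Int) * w + w → r = (K : Int) := by
          intro h1 h2
          exact hr_eq_of_mid h1 (by omega)
        rcases PySem.Int.mod_two_eq (K : Int) with hpar | hpar
        · -- even row
          obtain ⟨arr2, hfold2, hlen2, hrows2, hcontent2⟩ :=
            inner_invariant n num w (K : Int) ((K : Int) * w + 1) (cellVal w (K : Int))
              (fun t => (0 : Int) + (t : Int)) arr1
              (if num ≤ (K : Int) * w then ((r, c) : Int × Int) else ((0, 0) : Int × Int))
              w.toNat hnumn (by omega) (by omega) (by omega) hrows1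
              (fun t ht => ⟨by show (0:Int) ≤ 0 + (t:Int); omega,
                            by show (0:Int) + (t:Int) < w; omega⟩)
              (fun t ht => by
                show cellVal w (K : Int) (0 + (t : Int)) = (K : Int) * w + 1 + (t : Int)
                unfold cellVal; rw [if_pos hpar]; ring)
          refine ⟨arr2, ?_, hlen2.trans hlen, hrows2, ?_⟩
          · simp only [aOuterStep, Bool.false_eq_true, if_false, hbox]
            rw [if_neg (by omega), if_pos hpar, PySem.List.pyRange_one 0 w]
            simp only [sub_zero]
            rw [hfold2]
            dsimp only
            simp only [Prod.mk.injEq]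
            refine ⟨trivial, by omega, ?_, ?_, by rw [if_neg (by omega)]⟩
            · split_ifs with h1 h2 h3 h4 h5 <;> try rfl
              · show (K : Int) = r
                have := hreq (by omega) h2; omega
              · exfalso; omega
              · exfalso; omega
              · exfalso; omega
            · split_ifs with h1 h2 h3 h4 h5 <;> try rfl
              · show (0 : Int) + (((num - ((K : Int) * w + 1)).toNat : Nat) : Int) = c
                have hrq := hreq (by omega) h2
                have hcv := hcval
                unfold cellVal at hcv
                rw [hrq, if_pos hpar] at hcv
                omega
              · exfalso; omega
              · exfalso; omega
              · exfalso; omega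
          · intro i j hi0 hi hj0 hj
            rw [hcontent2 i j hi0 (by omega) hj0 hj, hcontent i j hi0 hi hj0 hj]
            by_cases hiK : i = (K : Int)
            · by_cases hcn : cellVal w (K : Int) j ≤ n
              · rw [if_pos ⟨hiK, ⟨j.toNat, by omega,
                    by show (0:Int) + ((j.toNat : Nat) : Int) = j; omega⟩, hcn⟩,
                    if_pos ⟨by omega, by rw [hiK]; exact hcn⟩, hiK]
              · rw [if_neg (fun h => hcn h.2.2), if_neg (by omega),
                    if_neg (fun h => hcn (by rw [← hiK]; exact h.2))]
            · rw [if_neg (fun h => hiK h.1),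
                  if_congr (show (i < (K:Int) + 1 ∧ cellVal w i j ≤ n) ↔ (i < (K:Int) ∧ cellVal w i j ≤ n)
                    from by constructor <;> rintro ⟨h1, h2⟩ <;> exact ⟨by omega, h2⟩) rfl rfl]
        · -- odd row
          obtain ⟨arr2, hfold2, hlen2, hrows2, hcontent2⟩ :=
            inner_invariant n num w (K : Int) ((K : Int) * w + 1) (cellVal w (K : Int))
              (fun t => w - 1 - (t : Int)) arr1
              (if num ≤ (K : Int) * w then ((r, c) : Int × Int) else ((0, 0) : Int × Int))
              w.toNat hnumn (by omega) (by omega) (by omega) hrows1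
              (fun t ht => ⟨by show (0:Int) ≤ w - 1 - (t:Int); omega,
                            by show w - 1 - (t:Int) < w; omega⟩)
              (fun t ht => by
                show cellVal w (K : Int) (w - 1 - (t : Int)) = (K : Int) * w + 1 + (t : Int)
                unfold cellVal; rw [if_neg (by omega)]; ring)
          refine ⟨arr2, ?_, hlen2.trans hlen, hrows2, ?_⟩
          · simp only [aOuterStep, Bool.false_eq_true, if_false, hbox]
            rw [if_neg (by omega), if_neg (by omega), PySem.List.pyRange_neg_one (w - 1) (-1)]
            rw [show ((w - 1) - (-1 : Int)).toNat = w.toNat from by omega]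
            rw [hfold2]
            dsimp only
            simp only [Prod.mk.injEq]
            refine ⟨trivial, by omega, ?_, ?_, by rw [if_neg (by omega)]⟩
            · split_ifs with h1 h2 h3 h4 h5 <;> try rfl
              · show (K : Int) = r
                have := hreq (by omega) h2; omega
              · exfalso; omega
              · exfalso; omega
              · exfalso; omega
            · split_ifs with h1 h2 h3 h4 h5 <;> try rfl
              · show w - 1 - (((num - ((K : Int) * w + 1)).toNat : Nat) : Int) = c
                have hrq := hreq (by omega) h2
                have hcv := hcval
                unfold cellVal at hcv
                rw [hrq, if_neg (by omega)] at hcv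
                omega
              · exfalso; omega
              · exfalso; omega
              · exfalso; omega
          · intro i j hi0 hi hj0 hj
            rw [hcontent2 i j hi0 (by omega) hj0 hj, hcontent i j hi0 hi hj0 hj]
            by_cases hiK : i = (K : Int)
            · by_cases hcn : cellVal w (K : Int) j ≤ n
              · rw [if_pos ⟨hiK, ⟨(w - 1 - j).toNat, by omega,
                    by show w - 1 - (((w - 1 - j).toNat : Nat) : Int) = j; omega⟩, hcn⟩,
                    if_pos ⟨by omega, by rw [hiK]; exact hcn⟩, hiK]
              · rw [if_neg (fun h => hcn h.2.2), if_neg (by omega),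
                    if_neg (fun h => hcn (by rw [← hiK]; exact h.2))]
            · rw [if_neg (fun h => hiK h.1),
                  if_congr (show (i < (K:Int) + 1 ∧ cellVal w i j ≤ n) ↔ (i < (K:Int) ∧ cellVal w i j ≤ n)
                    from by constructor <;> rintro ⟨h1, h2⟩ <;> exact ⟨by omega, h2⟩) rfl rfl]

-- the two ports agree on the natural domain
theorem final_eq (n w num : Int) (hw : 1 ≤ w) (hnum1 : 1 ≤ num) (hnumn : num ≤ n) :
    solution n w num = solution_alt n w num := by
  unfold solution solution_alt
  dsimp only
  set q := PySem.Int.floordiv n w with hq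
  set s := PySem.Int.mod n w with hs
  have hqs : q * w + s = n := PySem.Int.floordiv_mul_add_mod n w
  have hs0 : 0 ≤ s := PySem.Int.mod_nonneg n (by omega)
  have hsw : s < w := PySem.Int.mod_lt n (by omega)
  set hA := if s = 0 then q else q + 1 with hhA
  have hA_ub : n ≤ hA * w := by
    rcases eq_or_ne s 0 with h | h
    · rw [hhA, if_pos h]; omega
    · rw [hhA, if_neg h, show (q + 1) * w = q * w + w by ring]; omega
  have hA_lb : (hA - 1) * w < n := by
    rcases eq_or_ne s 0 with h | h
    · rw [hhA, if_pos h, show (q - 1) * w = q * w - w by ring]; omega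
    · rw [hhA, if_neg h, show (q + 1 - 1) * w = q * w by ring]; omega
  have hA1 : 1 ≤ hA := by
    by_contra hcon
    have h0 : hA ≤ 0 := by omega
    have := mul_le_mul_of_nonneg_right h0 (show (0:Int) ≤ w by omega)
    simp at this; omega
  have hB : -(PySem.Int.floordiv (-n) w) = hA :=
    (PySem.Int.neg_floordiv_neg_eq_iff_of_pos (by omega)).mpr ⟨hA_lb, hA_ub⟩
  rw [hB, if_neg (show ¬ hA ≤ 0 by omega)]
  set r := PySem.Int.floordiv (num - 1) w with hr
  set c0 := PySem.Int.mod (num - 1) w with hc0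
  have hrc : r * w + c0 = num - 1 := PySem.Int.floordiv_mul_add_mod _ _
  have hc00 : 0 ≤ c0 := PySem.Int.mod_nonneg _ (by omega)
  have hc0w : c0 < w := PySem.Int.mod_lt _ (by omega)
  have hr0 : 0 ≤ r := by
    by_contra hcon
    have h1 : r ≤ -1 := by omega
    have := mul_le_mul_of_nonneg_right h1 (show (0:Int) ≤ w by omega)
    simp at this; omega
  have hrw1 : r * w < num := by omega
  have hrw2 : num ≤ (r + 1) * w := by rw [show (r + 1) * w = r * w + w by ring]; omega
  set c := if PySem.Int.mod r 2 = 1 then w - 1 - c0 else c0 with hc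
  have hcb : 0 ≤ c ∧ c < w := by
    rcases PySem.Int.mod_two_eq r with h | h
    · rw [hc, if_neg (by omega)]; omega
    · rw [hc, if_pos h]; omega
  have hcval : cellVal w r c = num := by
    unfold cellVal
    rcases PySem.Int.mod_two_eq r with h | h
    · rw [if_pos h, hc, if_neg (by omega)]; omega
    · rw [if_neg (by omega), hc, if_pos h]; omega
  have hrA : r < hA := by
    have h1 : r * w < hA * w := by omega
    exact lt_of_mul_lt_mul_right h1 (by omega)
  set arr0 := (PySem.List.pyRange 0 hA 1).map
      (fun _ => (PySem.List.pyRange 0 w 1).map (fun _ => (0 : Int))) with harr0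
  have hAlen : ((arr0.length : Nat) : Int) = hA := by
    rw [harr0, List.length_map, PySem.List.length_pyRange_one]; omega
  have hrows0 : ∀ row ∈ arr0, (row.length : Int) = w := by
    intro row hrow
    rw [harr0] at hrow
    obtain ⟨x, hx, hxr⟩ := List.mem_map.mp hrow
    rw [← hxr, List.length_map, PySem.List.length_pyRange_one]; omega
  have hz0 : ∀ i j : Int, 0 ≤ i → 0 ≤ j → PySem.List.pyGetD (PySem.List.pyGetD arr0 i []) j 0 = 0 := by
    intro i j hi hj
    rw [PySem.List.pyGetD_of_nonneg _ _ hi, PySem.List.pyGetD_of_nonneg _ _ hj]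
    rcases lt_or_ge i.toNat arr0.length with hlt | hge
    · have hgd : arr0.getD i.toNat [] = arr0[i.toNat] := by
        simp [List.getD_eq_getElem?_getD, List.getElem?_eq_getElem hlt]
      have hrow0 : ∀ row ∈ arr0, row = (PySem.List.pyRange 0 w 1).map (fun _ => (0 : Int)) := by
        intro row hrow
        rw [harr0] at hrow
        obtain ⟨x, hx, hxr⟩ := List.mem_map.mp hrow
        exact hxr.symm
      rw [hgd, hrow0 _ (List.getElem_mem hlt)]
      cases h : (PySem.List.pyRange 0 w 1)[j.toNat]? <;>
        simp [List.getD_eq_getElem?_getD, List.getElem?_map, h]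
    · have hgd : arr0.getD i.toNat [] = [] := by
        rw [List.getD_eq_getElem?_getD, List.getElem?_eq_none (by omega)]; rfl
      rw [hgd]
      simp [List.getD_eq_getElem?_getD]
  have hKcast : ((hA.toNat : Nat) : Int) = hA := Int.toNat_of_nonneg (by omega)
  obtain ⟨arr1, hfold, hlen1, hrows1, hcontent⟩ :=
    outer_invariant n w num r c hA hw hnum1 hnumn hr0 ⟨hrw1, hrw2⟩ hcb hcval arr0 hz0 hrows0
      hAlen hA_ub hA.toNat (by omega)
  rw [hKcast] at hfold hcontent
  rw [PySem.List.pyRange_one 0 hA]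
  simp only [zero_add, sub_zero]
  rw [hfold]
  dsimp only
  rw [if_pos (show num ≤ hA * w by omega)]
  dsimp only
  have hread : ∀ i : Int, r ≤ i → i < hA →
      PySem.List.pyGetD (PySem.List.pyGetD arr1 i []) c 0 =
        if cellVal w i c ≤ n then cellVal w i c else 0 := by
    intro i h1 h2
    rw [hcontent i c (by omega) (by omega) hcb.1 hcb.2,
        if_congr (and_iff_right (show i < hA by omega)) rfl rfl]
  have hcellpos : ∀ i j : Int, 0 ≤ i → 0 ≤ j → j < w → 0 < cellVal w i j := by
    intro i j h1 h2 h3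
    unfold cellVal
    have := mul_nonneg h1 (show (0:Int) ≤ w by omega)
    rcases PySem.Int.mod_two_eq i with h | h
    · rw [if_pos h]; omega
    · rw [if_neg (by omega)]; omega
  have hcell_le : ∀ i : Int, 0 ≤ i → i ≤ hA - 2 → cellVal w i c ≤ n := by
    intro i h1 h2
    have hm : (i + 1) * w ≤ (hA - 1) * w := mul_le_mul_of_nonneg_right (by omega) (by omega)
    rw [show (i + 1) * w = i * w + w by ring] at hm
    unfold cellVal
    rcases PySem.Int.mod_two_eq i with h | h
    · rw [if_pos h]; omega
    · rw [if_neg (by omega)]; omega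
  rw [PySem.List.pyRange_one_append r (hA - 1) hA (by omega) (by omega), List.foldl_append]
  have hcg : ∀ (acc : Int), ∀ x ∈ PySem.List.pyRange r (hA - 1) 1,
      (if PySem.List.pyGetD (PySem.List.pyGetD arr1 x []) c 0 ≠ 0 then acc + 1 else acc) =
        acc + 1 := by
    intro acc x hx
    rw [PySem.List.mem_pyRange_one] at hx
    rw [hread x (by omega) (by omega), if_pos (hcell_le x (by omega) (by omega)),
        if_pos (by have := hcellpos x c (by omega) hcb.1 hcb.2; omega)]
  rw [PySem.List.foldl_congr_mem _ _ (fun (acc : Int) (_ : Int) => acc + 1) _ hcg,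
      PySem.List.foldl_add _ (fun _ => (1 : Int))]
  have hseg : ((PySem.List.pyRange r (hA - 1) 1).map (fun _ => (1 : Int))).sum = hA - 1 - r := by
    rw [List.map_const', List.sum_replicate, PySem.List.length_pyRange_one]
    simp; omega
  rw [hseg]
  have hsing : PySem.List.pyRange (hA - 1) hA 1 = [hA - 1] := by
    have h1 := PySem.List.pyRange_one_singleton (hA - 1)
    rw [show hA - 1 + 1 = hA by ring] at h1
    exact h1
  rw [hsing]
  simp only [List.foldl_cons, List.foldl_nil]
  rw [hread (hA - 1) (by omega) (by omega)]
  by_cases hX : cellVal w (hA - 1) c ≤ n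
  · rw [if_pos hX, if_pos (by have := hcellpos (hA - 1) c (by omega) hcb.1 hcb.2; omega)]
    unfold cellVal at hX
    rw [if_pos hX]
    omega
  · rw [if_neg hX, if_neg (by omega)]
    unfold cellVal at hX
    rw [if_neg hX]
    omega

-- A returns 0 whenever its computed height is ≤ 0: every loop is empty
theorem solution_empty (n : Int) (w : Int) (num : Int)
    (hh : (if PySem.Int.mod n w = 0 then PySem.Int.floordiv n w
           else PySem.Int.floordiv n w + 1) ≤ 0) : solution n w num = 0 := by
  unfold solution
  dsimp only
  rw [PySem.List.pyRange_one_eq_nil hh]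
  simp only [List.map_nil, List.foldl_nil]
  rw [PySem.List.pyRange_one_eq_nil hh]
  simp only [List.foldl_nil]

-- B returns 0 whenever its computed height is ≤ 0
theorem solution_alt_empty (n : Int) (w : Int) (num : Int)
    (hh : -(PySem.Int.floordiv (-n) w) ≤ 0) : solution_alt n w num = 0 := by
  unfold solution_alt
  dsimp only
  rw [if_pos hh]

-- ===== VERDICT (by name: the statement is the Claim_ definition above) =====
theorem solution_spec : Claim_unchanged_solution := by
  intro n w num _ hPre
  unfold Spec_solution
  intro hnD
  unfold D_solution at hnD
  unfold Pre_solution at hPre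
  by_cases hw : 1 ≤ w
  · by_cases hn : n ≤ 0
    · -- empty pile on the A side and on the B side
      have hqs := PySem.Int.floordiv_mul_add_mod n w
      have hs0 := PySem.Int.mod_nonneg n (show (0:Int) < w by omega)
      have hsw := PySem.Int.mod_lt n (show (0:Int) < w by omega)
      have hq0 : PySem.Int.floordiv n w ≤ 0 := by
        by_contra hcon
        have := mul_le_mul_of_nonneg_right
          (show (1:Int) ≤ PySem.Int.floordiv n w by omega) (show (0:Int) ≤ w by omega)
        rw [one_mul] at this
        omega
      have hh : (if PySem.Int.mod n w = 0 then PySem.Int.floordiv n w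
                 else PySem.Int.floordiv n w + 1) ≤ 0 := by
        rcases eq_or_ne (PySem.Int.mod n w) 0 with h | h
        · rw [if_pos h]; exact hq0
        · rw [if_neg h]
          by_contra hcon
          have hq' : PySem.Int.floordiv n w = 0 := by omega
          rw [hq'] at hqs
          omega
      have hqs2 := PySem.Int.floordiv_mul_add_mod (-n) w
      have hs02 := PySem.Int.mod_nonneg (-n) (show (0:Int) < w by omega)
      have hsw2 := PySem.Int.mod_lt (-n) (show (0:Int) < w by omega)
      have hq20 : 0 ≤ PySem.Int.floordiv (-n) w := by
        by_contra hcon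
        have := mul_le_mul_of_nonneg_right
          (show PySem.Int.floordiv (-n) w ≤ -1 by omega) (show (0:Int) ≤ w by omega)
        rw [neg_one_mul] at this
        omega
      rw [solution_empty n w num hh, solution_alt_empty n w num (by omega)]
    · have hrange : 1 ≤ num ∧ num ≤ n := by omega
      exact final_eq n w num hw hrange.1 hrange.2
  · -- w ≤ -1 (and then 0 ≤ n): the computed height is ≤ 0 on both sides
    obtain ⟨hwneg, hn0⟩ := hPre.resolve_left hw
    have hqs := PySem.Int.floordiv_mul_add_mod n w
    have hmb := PySem.Int.mod_neg_bounds (a := n) (show w < 0 by omega)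
    have hq0 : PySem.Int.floordiv n w ≤ 0 := by
      by_contra hcon
      have := mul_le_mul_of_nonpos_right
        (show (1:Int) ≤ PySem.Int.floordiv n w by omega) (show w ≤ 0 by omega)
      rw [one_mul] at this
      omega
    have hh : (if PySem.Int.mod n w = 0 then PySem.Int.floordiv n w
               else PySem.Int.floordiv n w + 1) ≤ 0 := by
      rcases eq_or_ne (PySem.Int.mod n w) 0 with h | h
      · rw [if_pos h]; exact hq0
      · rw [if_neg h]
        by_contra hcon
        have hq' : PySem.Int.floordiv n w = 0 := by omega
        rw [hq'] at hqs
        omega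
    have hqs2 := PySem.Int.floordiv_mul_add_mod (-n) w
    have hmb2 := PySem.Int.mod_neg_bounds (a := -n) (show w < 0 by omega)
    have hq20 : 0 ≤ PySem.Int.floordiv (-n) w := by
      by_contra hcon
      have := mul_le_mul_of_nonpos_right
        (show PySem.Int.floordiv (-n) w ≤ -1 by omega) (show w ≤ 0 by omega)
      rw [neg_one_mul] at this
      omega
    rw [solution_empty n w num hh, solution_alt_empty n w num (by omega)]

theorem solution_changed : Claim_changed_solution := by
  unfold Claim_changed_solution; decide
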